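-- pv_equiv track=rewrite | github.com/Sungtong1/TIL | APS/매일 문제풀기/백준/1235 학생 번호.py | student_number
-- ===== SOURCE A (Python) =====
-- def student_number(numbers):
--     answer = 0
--     for idx in range(1, len(numbers[0]) + 1):
--         temp = [num[:idx] for num in numbers]
--
--         if len(temp) == len(set(temp)):
--             answer = idx
--             break
--
--     return answer
-- ===== SOURCE B (Python) =====
-- def student_number(numbers):
--     L = len(numbers[0])
--
--     def distinct(k):
--         seen = set()
--         for num in numbers:
--             p = num[:k]
--             if p in seen:
--                 return False
--             seen.add(p)
--         return True
--
--     # uniqueness of length-k prefixes is monotone in k, so binary search works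
--     if L == 0 or not distinct(L):
--         return 0
--     lo, hi = 1, L
--     while lo < hi:
--         mid = (lo + hi) // 2
--         if distinct(mid):
--             hi = mid
--         else:
--             lo = mid + 1
--     return lo
-- ===== Notes on version B (the rewrite author's own statement) =====
-- stated objective: faster
-- what changed: replaces the linear scan over all prefix lengths (each rebuilding the whole prefix list and a set) by a binary search over the prefix length, using the fact that prefix-uniqueness is monotone in the length; the distinctness test also early-exits on the first duplicate.
import Mathlib
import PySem

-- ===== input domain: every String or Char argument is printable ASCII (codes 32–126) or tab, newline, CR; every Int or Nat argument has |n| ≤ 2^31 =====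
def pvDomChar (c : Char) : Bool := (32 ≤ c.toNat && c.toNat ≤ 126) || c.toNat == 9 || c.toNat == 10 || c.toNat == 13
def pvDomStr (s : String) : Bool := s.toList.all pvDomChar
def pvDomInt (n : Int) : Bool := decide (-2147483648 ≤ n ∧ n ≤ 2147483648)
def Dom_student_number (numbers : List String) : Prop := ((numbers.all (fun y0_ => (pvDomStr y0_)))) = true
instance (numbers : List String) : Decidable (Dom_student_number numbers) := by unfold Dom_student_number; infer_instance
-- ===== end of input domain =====

-- B replaces A's linear scan over all prefix lengths by a binary search over the
-- prefix length (prefix-uniqueness is monotone in the length); equal return values on Pre_.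

-- ===== PORT A =====
-- temp = [num[:idx] for num in numbers]
def pvTempA (numbers : List String) (idx : Int) : List String :=
  numbers.map (fun num => PySem.Str.slice num none (some idx))

-- the 'for idx in range(...)' loop with its break; answer stays 0 if no idx works
def pvLoopA (numbers : List String) : List Int → Int
  | [] => 0
  | idx :: rest =>
    let temp := pvTempA numbers idx
    if temp.length == (PySem.Set.ofList temp).length then idx
    else pvLoopA numbers rest

def student_number (numbers : List String) : Int :=
  match PySem.List.pyGet? numbers 0 with
  | none => 0   -- numbers[0] raises IndexError on []; excluded by Pre_
  | some first => pvLoopA numbers (PySem.List.pyRange 1 (PySem.Str.len first + 1) 1)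

-- ===== PORT B =====
-- distinct(k): one pass over numbers with a set, early exit on the first duplicate prefix
def pvDistinctGo (k : Int) : List String → PySem.Set String → Bool
  | [], _ => true
  | num :: rest, seen =>
    let p := PySem.Str.slice num none (some k)
    if PySem.Set.contains seen p then false
    else pvDistinctGo k rest (PySem.Set.add seen p)

def pvDistinct (numbers : List String) (k : Int) : Bool :=
  pvDistinctGo k numbers PySem.Set.empty

-- the 'while lo < hi' binary search; fuel bounds the iteration count (hi - lo only shrinks)
def pvBSearch (numbers : List String) : Nat → Int → Int → Int
  | 0, lo, _ => lo
  | fuel + 1, lo, hi =>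
    if lo < hi then
      let mid := PySem.Int.floordiv (lo + hi) 2
      if pvDistinct numbers mid then pvBSearch numbers fuel lo mid
      else pvBSearch numbers fuel (mid + 1) hi
    else lo

def student_number_alt (numbers : List String) : Int :=
  match PySem.List.pyGet? numbers 0 with
  | none => 0   -- numbers[0] raises IndexError on []; excluded by Pre_
  | some first =>
    let L := PySem.Str.len first
    if L == 0 || !pvDistinct numbers L then 0
    else pvBSearch numbers L.toNat 1 L

-- ===== PRECONDITION & SPEC =====
-- Pre_ excludes only the empty list, on which A (numbers[0]) raises IndexError.
def Pre_student_number (numbers : List String) : Prop := numbers ≠ []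
instance (numbers : List String) : Decidable (Pre_student_number numbers) := by
  unfold Pre_student_number; infer_instance

def pvWitness_student_number : List String := ["1212", "1248"]

def Spec_student_number (numbers : List String) (out : Int) : Prop := out = student_number_alt numbers
instance (numbers : List String) (out : Int) : Decidable (Spec_student_number numbers out) := by
  unfold Spec_student_number; infer_instance

-- ===== CLAIM (what is proved, stated in full; the proofs are below) =====
def Claim_equal_student_number : Prop := ∀ (numbers : List String), Dom_student_number numbers → Pre_student_number numbers → Spec_student_number numbers (student_number numbers)

-- ===== LEMMAS AND PROOFS =====

-- the abstract predicate both tests decide: length-k prefixes (as char lists) are pairwise distinct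
def pvP (numbers : List String) (k : Nat) : Prop :=
  (numbers.map (fun num => num.toList.take k)).Nodup

-- set(l) is a sublist of l
theorem pvOfListSublist {α : Type} [BEq α] (l : List α) : (PySem.Set.ofList l).Sublist l := by
  induction l using List.reverseRecOn with
  | nil => simp [PySem.Set.ofList]
  | append_singleton xs x ih =>
    rw [PySem.Set.ofList_append_singleton]
    unfold PySem.Set.add
    split
    · exact ih.trans (List.sublist_append_left xs [x])
    · exact ih.append (List.Sublist.refl [x])

-- len(l) == len(set(l)) decides Nodup
theorem pvSetLen {α : Type} [BEq α] [LawfulBEq α] (l : List α) :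
    (l.length == (PySem.Set.ofList l).length) = true ↔ l.Nodup := by
  rw [beq_iff_eq]
  constructor
  · intro hlen
    have := List.Sublist.eq_of_length (pvOfListSublist l) hlen.symm
    have hn := PySem.Set.nodup_ofList (xs := l)
    rw [this] at hn
    exact hn
  · intro h
    rw [PySem.Set.ofList_eq_self_of_nodup l h]

theorem pvOfListInj (a b : List Char) (h : String.ofList a = String.ofList b) : a = b := by
  have := congrArg String.toList h
  simpa using this

-- both tests compute pvP (for a nonnegative length)
theorem pvTempA_eq (numbers : List String) (k : Int) (hk : 0 ≤ k) :
    pvTempA numbers k = numbers.map (fun num => String.ofList (num.toList.take k.toNat)) := by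
  unfold pvTempA
  refine List.map_congr_left (fun num _ => ?_)
  simp [PySem.Str.slice, PySem.List.slice_to _ hk]

theorem pvNodupOfListMap (numbers : List String) (k : Nat) :
    (numbers.map (fun num => String.ofList (num.toList.take k))).Nodup ↔ pvP numbers k := by
  unfold pvP
  rw [show (numbers.map fun num => String.ofList (num.toList.take k))
      = (numbers.map fun num => num.toList.take k).map String.ofList by simp]
  constructor
  · exact fun h => h.of_map
  · exact fun h => h.map (fun a b => pvOfListInj a b)

theorem pvTestA_iff (numbers : List String) (k : Int) (hk : 0 ≤ k) :
    ((pvTempA numbers k).length == (PySem.Set.ofList (pvTempA numbers k)).length) = true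
      ↔ pvP numbers k.toNat := by
  rw [pvSetLen, pvTempA_eq numbers k hk, pvNodupOfListMap]

theorem pvDistinctGo_iff (k : Int) (l : List String) (seen : PySem.Set String) :
    pvDistinctGo k l seen = true ↔
      (l.map (fun num => PySem.Str.slice num none (some k))).Nodup ∧
      ∀ p ∈ l.map (fun num => PySem.Str.slice num none (some k)), p ∉ seen := by
  induction l generalizing seen with
  | nil => simp [pvDistinctGo]
  | cons num rest ih =>
    simp only [pvDistinctGo, List.map_cons, List.nodup_cons, List.mem_cons]
    by_cases hc : PySem.Str.slice num none (some k) ∈ seen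
    · have : PySem.Set.contains seen (PySem.Str.slice num none (some k)) = true := by
        rw [PySem.Set.contains_iff]; exact hc
      simp only [this, if_true]
      constructor
      · intro h; exact absurd h (by simp)
      · rintro ⟨-, h⟩
        exact absurd hc (h _ (Or.inl rfl))
    · have : PySem.Set.contains seen (PySem.Str.slice num none (some k)) = false := by
        cases h : PySem.Set.contains seen (PySem.Str.slice num none (some k))
        · rfl
        · exact absurd ((PySem.Set.contains_iff _ _).mp h) hc
      simp only [this, Bool.false_eq_true, if_false]
      rw [ih]
      constructor
      · rintro ⟨hnd, hmem⟩
        refine ⟨⟨fun hin => ?_, hnd⟩, ?_⟩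
        · have := hmem _ hin
          simp [PySem.Set.mem_add] at this
        · rintro p (rfl | hp)
          · exact hc
          · have := hmem _ hp
            simp [PySem.Set.mem_add] at this
            exact this.1
      · rintro ⟨⟨hne, hnd⟩, hmem⟩
        refine ⟨hnd, fun p hp => ?_⟩
        rw [PySem.Set.mem_add]
        rintro (h1 | rfl)
        · exact hmem p (Or.inr hp) h1
        · exact hne hp

theorem pvDistinct_iff (numbers : List String) (k : Int) (hk : 0 ≤ k) :
    pvDistinct numbers k = true ↔ pvP numbers k.toNat := by
  unfold pvDistinct
  rw [pvDistinctGo_iff]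
  have : ∀ num : String, PySem.Str.slice num none (some k)
      = String.ofList (num.toList.take k.toNat) := by
    intro num; simp [PySem.Str.slice, PySem.List.slice_to _ hk]
  simp only [this]
  rw [show (∀ p ∈ numbers.map (fun num => String.ofList (num.toList.take k.toNat)),
        p ∉ (PySem.Set.empty : PySem.Set String)) ↔ True by simp [PySem.Set.empty]]
  rw [and_true, pvNodupOfListMap]

-- monotonicity: if length-j prefixes are distinct so are length-k prefixes, j ≤ k
theorem pvP_mono (numbers : List String) {j k : Nat} (hjk : j ≤ k) (h : pvP numbers j) :
    pvP numbers k := by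
  unfold pvP at *
  have heq : (numbers.map fun num => num.toList.take j)
      = (numbers.map fun num => num.toList.take k).map (fun cs => cs.take j) := by
    simp only [List.map_map]
    refine List.map_congr_left (fun num _ => ?_)
    simp [List.take_take, Nat.min_eq_left hjk]
  rw [heq] at h
  exact h.of_map

theorem pvDistinct_mono (numbers : List String) {j k : Int} (hj : 0 ≤ j) (hjk : j ≤ k)
    (h : pvDistinct numbers j = true) : pvDistinct numbers k = true := by
  rw [pvDistinct_iff numbers j hj] at h
  rw [pvDistinct_iff numbers k (le_trans hj hjk)]
  exact pvP_mono numbers (by omega) h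

-- A's loop: returns 0 when every index fails
theorem pvLoopA_none (numbers : List String) (l : List Int)
    (h : ∀ i ∈ l, ((pvTempA numbers i).length == (PySem.Set.ofList (pvTempA numbers i)).length) = false) :
    pvLoopA numbers l = 0 := by
  induction l with
  | nil => rfl
  | cons a t ih =>
    simp only [pvLoopA]
    rw [h a (List.mem_cons_self)]
    simp only [Bool.false_eq_true, if_false]
    exact ih (fun i hi => h i (List.mem_cons_of_mem a hi))

-- A's loop: returns the first (= least, on an increasing list) succeeding index
theorem pvLoopA_first (numbers : List String) (m : Int) (l : List Int)
    (hsort : l.Pairwise (· < ·)) (hm : m ∈ l)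
    (htm : ((pvTempA numbers m).length == (PySem.Set.ofList (pvTempA numbers m)).length) = true)
    (hlt : ∀ i ∈ l, i < m → ((pvTempA numbers i).length == (PySem.Set.ofList (pvTempA numbers i)).length) = false) :
    pvLoopA numbers l = m := by
  induction l with
  | nil => cases hm
  | cons a t ih =>
    rcases List.mem_cons.mp hm with rfl | hmt
    · simp only [pvLoopA]; rw [htm]; simp
    · have ham : a < m := (List.pairwise_cons.mp hsort).1 m hmt
      simp only [pvLoopA]
      rw [hlt a List.mem_cons_self ham]
      simp only [Bool.false_eq_true, if_false]
      exact ih (List.pairwise_cons.mp hsort).2 hmt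
        (fun i hi h => hlt i (List.mem_cons_of_mem a hi) h)

-- binary search: under the invariant it homes in on the unique boundary m
theorem pvBSearch_spec (numbers : List String) (m : Int) (hm0 : 0 ≤ m)
    (htm : pvDistinct numbers m = true) :
    ∀ (fuel : Nat) (lo hi : Int), lo ≤ m → m ≤ hi → hi - lo ≤ (fuel : Int) →
    (∀ i, lo ≤ i → i < m → pvDistinct numbers i = false) →
    pvBSearch numbers fuel lo hi = m := by
  intro fuel
  induction fuel with
  | zero =>
    intro lo hi h1 h2 h3 _
    simp only [pvBSearch]
    omega
  | succ n ih =>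
    intro lo hi h1 h2 h3 hlt
    simp only [pvBSearch]
    by_cases hlh : lo < hi
    · simp only [hlh, if_true]
      have hmid := PySem.Int.floordiv_two_mid_bounds (le_of_lt hlh)
      have hmidlt : PySem.Int.floordiv (lo + hi) 2 < hi := by
        rw [PySem.Int.floordiv_lt_iff_lt_mul (by omega)]
        omega
      set mid := PySem.Int.floordiv (lo + hi) 2 with hmiddef
      by_cases hd : pvDistinct numbers mid = true
      · simp only [hd, if_true]
        have hmmid : m ≤ mid := by
          by_contra hcon
          have := hlt mid hmid.1 (by omega)
          rw [hd] at this; cases this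
        exact ih lo mid h1 hmmid (by omega) hlt
      · simp only [hd]
        have hmidm : mid < m := by
          by_contra hcon
          exact hd (pvDistinct_mono numbers hm0 (by omega) htm)
        exact ih (mid + 1) hi (by omega) h2 (by omega)
          (fun i hi1 hi2 => hlt i (by omega) hi2)
    · simp only [hlh, if_false]
      omega

-- ===== VERDICT (by name: the statement is the Claim_ definition above) =====
theorem student_number_spec : Claim_equal_student_number := by
  intro numbers _ hpre
  unfold Spec_student_number
  match numbers, hpre with
  | first :: rest, _ =>
  set numbers := first :: rest with hnums
  have hget : PySem.List.pyGet? numbers 0 = some first := by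
    simp [hnums, PySem.List.pyGet?, PySem.List.pyIdx?]
  obtain ⟨L, hL⟩ : ∃ L : Nat, first.toList.length = L := ⟨_, rfl⟩
  have hlen : PySem.Str.len first = (L : Int) := by
    simp [PySem.Str.len_eq, hL]
  unfold student_number student_number_alt
  rw [hget]
  simp only [hlen]
  by_cases hL0 : L = 0
  · -- range(1, 1) is empty on the A side; B returns 0 at the L == 0 guard
    subst hL0
    simp only [Nat.cast_zero]
    have hr : PySem.List.pyRange (1:Int) (0 + 1) = [] := by decide
    rw [hr]
    simp [pvLoopA]
  · have hL1 : (1:Int) ≤ (L:Int) := by omega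
    have hguard : (((L:Int)) == 0) = false := by simp; omega
    by_cases hdist : pvDistinct numbers (L:Int) = true
    · -- a least working length m exists; both sides return m
      have hq : ∃ k : Nat, 1 ≤ k ∧ pvP numbers k := by
        refine ⟨L, by omega, ?_⟩
        have := (pvDistinct_iff numbers (L:Int) (by omega)).mp hdist
        simpa using this
      classical
      set m : Nat := Nat.find hq with hmdef
      obtain ⟨hm1, hmP⟩ := Nat.find_spec hq
      have hmle : m ≤ L := Nat.find_le ⟨by omega, by
        have := (pvDistinct_iff numbers (L:Int) (by omega)).mp hdist
        simpa using this⟩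
      have hbelow : ∀ j : Nat, j < m → ¬(1 ≤ j ∧ pvP numbers j) := fun j hj => Nat.find_min hq hj
      -- any integer i with 1 ≤ i < m fails both tests
      have hfailP : ∀ i : Int, 1 ≤ i → i < (m:Int) → ¬ pvP numbers i.toNat := by
        intro i h1 h2 hP
        exact hbelow i.toNat (by omega) ⟨by omega, hP⟩
      have hPA : ((pvTempA numbers (m:Int)).length ==
          (PySem.Set.ofList (pvTempA numbers (m:Int))).length) = true := by
        rw [pvTestA_iff numbers (m:Int) (by omega)]
        simpa using hmP
      -- A side
      rw [pvLoopA_first numbers (m:Int) _ (PySem.List.pairwise_lt_pyRange_one 1 ((L:Int)+1))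
        (by rw [PySem.List.mem_pyRange_one]; omega) hPA
        (by
          intro i hi hilt
          rw [PySem.List.mem_pyRange_one] at hi
          cases h : ((pvTempA numbers i).length == (PySem.Set.ofList (pvTempA numbers i)).length)
          · rfl
          · exact absurd ((pvTestA_iff numbers i (by omega)).mp h) (hfailP i (by omega) hilt))]
      -- B side
      rw [hguard]
      have hdistb : (!pvDistinct numbers (L:Int)) = false := by rw [hdist]; rfl
      rw [hdistb]
      simp only [Bool.or_false, Bool.false_eq_true, if_false]
      have : ((L:Int)).toNat = L := by omega
      rw [this, pvBSearch_spec numbers (m:Int) (by omega)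
        (by rw [pvDistinct_iff numbers (m:Int) (by omega)]; simpa using hmP)
        L 1 (L:Int) (by omega) (by omega) (by omega)
        (by
          intro i h1 h2
          cases h : pvDistinct numbers i
          · rfl
          · exact absurd ((pvDistinct_iff numbers i (by omega)).mp h) (hfailP i h1 h2))]
    · -- no length works: monotonicity kills every index on the A side; B's guard fires
      have hdf : pvDistinct numbers (L:Int) = false := by
        cases h : pvDistinct numbers (L:Int)
        · rfl
        · exact absurd h hdist
      rw [pvLoopA_none numbers _ (by
        intro i hi
        rw [PySem.List.mem_pyRange_one] at hi
        cases h : ((pvTempA numbers i).length == (PySem.Set.ofList (pvTempA numbers i)).length)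
        · rfl
        · exfalso
          have hP := (pvTestA_iff numbers i (by omega)).mp h
          have : pvDistinct numbers (L:Int) = true := by
            rw [pvDistinct_iff numbers (L:Int) (by omega)]
            have : (L:Int).toNat = L := by omega
            rw [this]
            exact pvP_mono numbers (by omega) hP
          exact hdist this)]
      rw [hguard, hdf]
      rfl
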